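-- pv_equiv track=rewrite | github.com/anupsharma555/openprose-psychiatry-research-agent | prose_planner_shadow_eval.py | article_type_counts
-- ===== SOURCE A (Python) =====
-- from typing import Any
--
-- def compact_ws(text: Any) -> str:
--     return " ".join(str(text or "").split()).strip()
--
-- def article_type_counts(records: list[dict[str, Any]], primary_types: set[str], review_types: set[str]) -> tuple[int, int]:
--     primary = 0
--     review = 0
--     for rec in records:
--         at = compact_ws(rec.get("article_type"))
--         if at in primary_types and at not in review_types:
--             primary += 1
--         if at in review_types:
--             review += 1
--     return primary, review
-- ===== SOURCE B (Python) =====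
-- from typing import Any
--
-- def compact_ws(text: Any) -> str:
--     return " ".join(str(text or "").split()).strip()
--
-- def article_type_counts(records: list[dict[str, Any]], primary_types: set[str], review_types: set[str]) -> tuple[int, int]:
--     counts: dict[str, int] = {}
--     for rec in records:
--         t = compact_ws(rec.get("article_type"))
--         counts[t] = counts.get(t, 0) + 1
--     primary = sum(counts.get(t, 0) for t in primary_types if t not in review_types)
--     review = sum(counts.get(t, 0) for t in review_types)
--     return primary, review
-- ===== Notes on version B (the rewrite author's own statement) =====
-- stated objective: alternative
-- what changed: B replaces A's per-record branch tests with a tabulate-then-aggregate decomposition: one pass builds a frequency table of normalized article types, then the two counts are computed by iterating over the type sets and summing table entries.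
import Mathlib
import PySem

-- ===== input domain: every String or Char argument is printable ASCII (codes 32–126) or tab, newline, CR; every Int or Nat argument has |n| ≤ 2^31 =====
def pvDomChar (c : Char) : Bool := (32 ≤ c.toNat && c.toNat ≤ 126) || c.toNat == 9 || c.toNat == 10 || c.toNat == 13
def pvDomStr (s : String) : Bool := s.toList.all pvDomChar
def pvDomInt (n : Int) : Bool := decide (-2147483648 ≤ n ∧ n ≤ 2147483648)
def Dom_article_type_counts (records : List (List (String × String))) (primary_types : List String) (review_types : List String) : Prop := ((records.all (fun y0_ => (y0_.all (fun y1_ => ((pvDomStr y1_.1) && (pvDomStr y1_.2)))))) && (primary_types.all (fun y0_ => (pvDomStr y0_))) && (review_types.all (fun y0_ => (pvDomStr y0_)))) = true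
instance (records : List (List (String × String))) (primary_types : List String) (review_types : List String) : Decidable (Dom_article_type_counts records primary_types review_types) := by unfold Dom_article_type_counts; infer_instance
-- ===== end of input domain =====

-- B replaces A's per-record double branch test with a one-pass frequency table over
-- normalized types followed by aggregation over the two type sets (objective: alternative decomposition).

-- ===== PORT A =====
-- compact_ws(text): " ".join(str(text or "").split()).strip(); here text is rec.get("article_type") : Option String,
-- and 'text or ""' on an Option String is getD "" (an empty string is replaced by "" — itself).
def pvCompactWs (o : Option String) : String :=
  PySem.Str.strip (PySem.Str.join " " (PySem.Str.split₀ (o.getD "")))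

def article_type_counts (records : List (List (String × String))) (primary_types : List String) (review_types : List String) : Int × Int :=
  (records.foldl (fun (acc : Int × Int) rec =>
    let at_ := pvCompactWs ((PySem.Dict.ofList rec).get? "article_type")
    let p := if at_ ∈ primary_types ∧ at_ ∉ review_types then acc.1 + 1 else acc.1
    let r := if at_ ∈ review_types then acc.2 + 1 else acc.2
    (p, r)) (0, 0))

-- ===== PORT B =====
def article_type_counts_alt (records : List (List (String × String))) (primary_types : List String) (review_types : List String) : Int × Int :=
  let counts : PySem.Dict String Int := records.foldl (fun d rec =>
    let t := pvCompactWs ((PySem.Dict.ofList rec).get? "article_type")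
    d.insert t (d.getD t 0 + 1)) PySem.Dict.empty
  let primary := primary_types.foldl (fun s t => if t ∈ review_types then s else s + counts.getD t 0) 0
  let review := review_types.foldl (fun s t => s + counts.getD t 0) 0
  (primary, review)

-- ===== PRECONDITION & SPEC =====
-- primary_types and review_types are Python set[str] arguments: per the type convention they are lists of
-- DISTINCT elements; Pre_ states exactly that (B sums over the type lists, so a duplicated element has no Python counterpart).
def Pre_article_type_counts (_records : List (List (String × String))) (primary_types : List String) (review_types : List String) : Prop :=
  primary_types.Nodup ∧ review_types.Nodup
instance (records : List (List (String × String))) (primary_types : List String) (review_types : List String) : Decidable (Pre_article_type_counts records primary_types review_types) := by unfold Pre_article_type_counts; infer_instance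

def pvWitness_article_type_counts : (List (List (String × String))) × List String × List String :=
  ([[("article_type", "Review")], [("title", "x")]], ["RCT", "Cohort"], ["Review"])

def Spec_article_type_counts (records : List (List (String × String))) (primary_types : List String) (review_types : List String) (out : Int × Int) : Prop := out = article_type_counts_alt records primary_types review_types
instance (records : List (List (String × String))) (primary_types : List String) (review_types : List String) (out : Int × Int) : Decidable (Spec_article_type_counts records primary_types review_types out) := by unfold Spec_article_type_counts; infer_instance

-- ===== CLAIM (what is proved, stated in full; the proofs are below) =====
def Claim_equal_article_type_counts : Prop := ∀ (records : List (List (String × String))) (primary_types : List String) (review_types : List String), Dom_article_type_counts records primary_types review_types → Pre_article_type_counts records primary_types review_types → Spec_article_type_counts records primary_types review_types (article_type_counts records primary_types review_types)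

-- ===== LEMMAS AND PROOFS =====

def pvNorm (rec : List (String × String)) : String :=
  pvCompactWs ((PySem.Dict.ofList rec).get? "article_type")

-- A's loop counts, over the normalized types, the two predicates.
theorem foldlA (l : List String) (P R : List String) (a b : Int) :
    l.foldl (fun (acc : Int × Int) t =>
      (if t ∈ P ∧ t ∉ R then acc.1 + 1 else acc.1,
       if t ∈ R then acc.2 + 1 else acc.2)) (a, b)
    = (a + (l.countP (fun t => decide (t ∈ P ∧ t ∉ R)) : Int),
       b + (l.countP (fun t => decide (t ∈ R)) : Int)) := by
  induction l generalizing a b with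
  | nil => simp
  | cons x xs ih =>
    simp only [List.foldl_cons, List.countP_cons, ih]
    split_ifs <;> simp_all <;> ring

theorem A_eq (records : List (List (String × String))) (P R : List String) :
    article_type_counts records P R
    = (((records.map pvNorm).countP (fun t => decide (t ∈ P ∧ t ∉ R)) : Int),
       ((records.map pvNorm).countP (fun t => decide (t ∈ R)) : Int)) := by
  unfold article_type_counts
  have h : (fun (acc : Int × Int) (rec : List (String × String)) =>
      let at_ := pvCompactWs ((PySem.Dict.ofList rec).get? "article_type")
      let p := if at_ ∈ P ∧ at_ ∉ R then acc.1 + 1 else acc.1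
      let r := if at_ ∈ R then acc.2 + 1 else acc.2
      (p, r))
    = (fun (acc : Int × Int) rec =>
        (if pvNorm rec ∈ P ∧ pvNorm rec ∉ R then acc.1 + 1 else acc.1,
         if pvNorm rec ∈ R then acc.2 + 1 else acc.2)) := rfl
  rw [h, ← List.foldl_map (f := pvNorm)
      (g := fun (acc : Int × Int) t =>
        (if t ∈ P ∧ t ∉ R then acc.1 + 1 else acc.1,
         if t ∈ R then acc.2 + 1 else acc.2)),
      foldlA]
  simp

theorem counts_getD (records : List (List (String × String))) (t : String) :
    (records.foldl (fun (d : PySem.Dict String Int) rec =>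
        let s := pvCompactWs ((PySem.Dict.ofList rec).get? "article_type")
        d.insert s (d.getD s 0 + 1)) PySem.Dict.empty).getD t 0
    = ((records.map pvNorm).count t : Int) := by
  have h : (fun (d : PySem.Dict String Int) (rec : List (String × String)) =>
      let s := pvCompactWs ((PySem.Dict.ofList rec).get? "article_type")
      d.insert s (d.getD s 0 + 1))
    = (fun (d : PySem.Dict String Int) rec =>
        d.insert (pvNorm rec) (d.getD (pvNorm rec) 0 + 1)) := rfl
  rw [h, ← List.foldl_map (f := pvNorm)
      (g := fun (d : PySem.Dict String Int) s => d.insert s (d.getD s 0 + 1)),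
      PySem.Dict.getD_foldl_insert_add_one]
  simp

theorem sum_zipWith_add (l1 l2 : List Int) (h : l1.length = l2.length) :
    (List.zipWith (· + ·) l1 l2).sum = l1.sum + l2.sum := by
  induction l1 generalizing l2 with
  | nil => cases l2 <;> simp_all
  | cons x xs ih =>
    cases l2 with
    | nil => simp at h
    | cons y ys =>
      simp only [List.zipWith_cons_cons, List.sum_cons, ih ys (by simpa using h)]
      ring

theorem indicator (P : List String) (hP : P.Nodup) (x : String) (R : List String) :
    ((P.map (fun t => if t ∈ R then (0 : Int) else if x = t then 1 else 0)).sum)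
    = if x ∈ P ∧ x ∉ R then 1 else 0 := by
  induction P with
  | nil => simp
  | cons t P' ih =>
    have htP : t ∉ P' := (List.nodup_cons.mp hP).1
    simp only [List.map_cons, List.sum_cons, ih hP.of_cons]
    by_cases hxt : x = t
    · subst hxt
      simp [htP]
    · simp only [List.mem_cons, hxt, false_or]
      split_ifs <;> simp_all

theorem key (P : List String) (hP : P.Nodup) (R : List String) (ns : List String) :
    ((P.map (fun t => if t ∈ R then (0 : Int) else (ns.count t : Int))).sum)
    = (ns.countP (fun x => decide (x ∈ P ∧ x ∉ R)) : Int) := by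
  induction ns with
  | nil => simp
  | cons x ns ih =>
    have hz : (P.map (fun t => if t ∈ R then (0 : Int) else (((x :: ns).count t : Nat) : Int)))
        = List.zipWith (· + ·)
            (P.map (fun t => if t ∈ R then (0 : Int) else (ns.count t : Int)))
            (P.map (fun t => if t ∈ R then (0 : Int) else if x = t then 1 else 0)) := by
      clear ih
      induction P with
      | nil => simp
      | cons t P' ihp =>
        simp only [List.map_cons, List.zipWith_cons_cons, ihp hP.of_cons]
        congr 1
        by_cases htR : t ∈ R
        · simp [htR]
        · by_cases hxt : x = t <;>
            simp [htR, hxt]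
    rw [hz, sum_zipWith_add _ _ (by simp), ih, indicator P hP x R, List.countP_cons]
    by_cases h : x ∈ P ∧ x ∉ R <;> simp [h]

theorem foldl_add_int (l : List String) (g : String → Int) (a : Int) :
    l.foldl (fun s t => s + g t) a = a + (l.map g).sum := by
  induction l generalizing a with
  | nil => simp
  | cons x xs ih => simp [ih]; ring

-- ===== VERDICT (by name: the statement is the Claim_ definition above) =====
theorem article_type_counts_spec : Claim_equal_article_type_counts := by
  intro records P R _ hPre
  unfold Spec_article_type_counts
  rcases hPre with ⟨hP, hR⟩
  rw [A_eq]
  show _ =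
    ((P.foldl (fun s t => if t ∈ R then s else s +
        (records.foldl (fun (d : PySem.Dict String Int) rec =>
          let s := pvCompactWs ((PySem.Dict.ofList rec).get? "article_type")
          d.insert s (d.getD s 0 + 1)) PySem.Dict.empty).getD t 0) 0),
     (R.foldl (fun s t => s +
        (records.foldl (fun (d : PySem.Dict String Int) rec =>
          let s := pvCompactWs ((PySem.Dict.ofList rec).get? "article_type")
          d.insert s (d.getD s 0 + 1)) PySem.Dict.empty).getD t 0) 0))
  simp only [counts_getD]
  rw [Prod.mk.injEq]
  refine ⟨?_, ?_⟩
  · have hfun : (fun (s : Int) t => if t ∈ R then s else s + ((records.map pvNorm).count t : Int))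
        = (fun (s : Int) t => s + (if t ∈ R then (0 : Int) else ((records.map pvNorm).count t : Int))) := by
      funext s t; split_ifs <;> ring
    rw [hfun, foldl_add_int, key P hP R]
    ring
  · rw [foldl_add_int]
    have hkey := key R hR [] (records.map pvNorm)
    simp only [List.not_mem_nil, not_false_iff, and_true, if_false] at hkey
    rw [hkey]
    ring
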